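-- pv_equiv track=rewrite | github.com/comejv/uni-projects | INF402/solver.py | dnf_to_cnf
-- ===== SOURCE A (Python) =====
-- def dnf_to_cnf(dnf: list[list]) -> list[list]:
--     """Convert a dnf to a cnf.
--
--     Args:
--         dnf (list[list]): dnf to convert.
--
--     Returns:
--         list[list]: cnf.
--     """
--     cnf = []
--     if dnf == []:
--         return [[]]
--     else:
--         list = dnf[0]
--         suite = dnf[1:]
--         for lit in list:
--             for lit2 in dnf_to_cnf(suite):
--                 lit2.append(lit)
--                 cnf.append(lit2)
--         return cnf
-- ===== SOURCE B (Python) =====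
-- def dnf_to_cnf(dnf: list[list]) -> list[list]:
--     """Convert a dnf to a cnf (iterative fold, no recursion)."""
--     cnf = [[]]
--     for sub in reversed(dnf):
--         cnf = [clause + [lit] for lit in sub for clause in cnf]
--     return cnf
-- ===== Notes on version B (the rewrite author's own statement) =====
-- stated objective: simpler
-- what changed: Replaces the recursion over sublists by a single iterative fold from the last sublist to the first, rebuilding the clause set with one comprehension per sublist.
import Mathlib
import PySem

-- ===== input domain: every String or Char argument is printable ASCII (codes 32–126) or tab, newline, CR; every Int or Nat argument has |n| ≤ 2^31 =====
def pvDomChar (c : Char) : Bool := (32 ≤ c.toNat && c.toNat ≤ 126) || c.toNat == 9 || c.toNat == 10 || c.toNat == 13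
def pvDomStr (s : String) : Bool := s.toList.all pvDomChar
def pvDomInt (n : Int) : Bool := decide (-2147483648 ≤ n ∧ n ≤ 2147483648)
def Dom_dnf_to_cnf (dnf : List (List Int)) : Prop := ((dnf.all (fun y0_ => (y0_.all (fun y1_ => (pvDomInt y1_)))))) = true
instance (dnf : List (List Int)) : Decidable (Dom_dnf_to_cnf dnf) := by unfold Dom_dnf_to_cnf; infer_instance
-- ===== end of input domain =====

-- ===== PORT A =====
def dnf_to_cnf : List (List Int) → List (List Int)
  | [] => [[]]
  | l :: suite =>
    -- 'for lit in list: for lit2 in dnf_to_cnf(suite): cnf.append(lit2 + [lit])'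
    l.foldl (fun cnf lit =>
      (dnf_to_cnf suite).foldl (fun cnf lit2 => cnf ++ [lit2 ++ [lit]]) cnf) []

-- ===== PORT B =====
-- B: iterative fold from the last sublist to the first; each step is the comprehension
-- [clause + [lit] for lit in sub for clause in cnf]
def dnf_to_cnf_alt (dnf : List (List Int)) : List (List Int) :=
  dnf.reverse.foldl (fun cnf sub => sub.flatMap (fun lit => cnf.map (fun c => c ++ [lit]))) [[]]

-- ===== PRECONDITION & SPEC =====
def Spec_dnf_to_cnf (dnf : List (List Int)) (out : List (List Int)) : Prop := out = dnf_to_cnf_alt dnf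
instance (dnf : List (List Int)) (out : List (List Int)) : Decidable (Spec_dnf_to_cnf dnf out) := by unfold Spec_dnf_to_cnf; infer_instance

-- ===== CLAIM (what is proved, stated in full; the proofs are below) =====
def Claim_equal_dnf_to_cnf : Prop := ∀ (dnf : List (List Int)), Dom_dnf_to_cnf dnf → Spec_dnf_to_cnf dnf (dnf_to_cnf dnf)

-- ===== LEMMAS AND PROOFS =====

-- ===== VERDICT (by name: the statement is the Claim_ definition above) =====
theorem unfold_step (l : List Int) (rec : List (List Int)) :
    l.foldl (fun cnf lit => rec.foldl (fun cnf lit2 => cnf ++ [lit2 ++ [lit]]) cnf) []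
      = l.flatMap (fun lit => rec.map (fun c => c ++ [lit])) := by
  have h : ∀ (acc : List (List Int)),
      l.foldl (fun cnf lit => rec.foldl (fun cnf lit2 => cnf ++ [lit2 ++ [lit]]) cnf) acc
        = l.foldl (fun cnf lit => cnf ++ rec.map (fun c => c ++ [lit])) acc := by
    intro acc
    induction l generalizing acc with
    | nil => rfl
    | cons x xs ihl =>
      simp only [List.foldl_cons, PySem.List.foldl_append_singleton_eq_map, ihl]
  rw [h, PySem.List.foldl_append_eq_flatMap]
  simp

theorem ab_eq (dnf : List (List Int)) : dnf_to_cnf dnf = dnf_to_cnf_alt dnf := by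
  unfold dnf_to_cnf_alt
  rw [List.foldl_reverse]
  induction dnf with
  | nil => simp [dnf_to_cnf]
  | cons l suite ih =>
    simp only [dnf_to_cnf, List.foldr_cons, unfold_step, ih]

theorem dnf_to_cnf_spec : Claim_equal_dnf_to_cnf := by
  intro dnf _
  unfold Spec_dnf_to_cnf
  exact ab_eq dnf
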